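-- pv_equiv track=rewrite | github.com/LWJOO/pythonQ | 7.29/프로_제일작은수제거하기.py | solution
-- ===== SOURCE A (Python) =====
-- def solution(arr):
--     a = 0
--     if len(arr) > 1:
--         for i in range(1,len(arr)):
--             if arr[i-1] > arr[i]:
--                 a = arr[i]
--         arr.remove(a)
--         return arr
--     else:
--         return [-1]
-- ===== SOURCE B (Python) =====
-- def solution(arr):
--     if len(arr) <= 1:
--         return [-1]
--     # value-pipeline: collect the values at every adjacent descent, take the last (0 if none)
--     descents = [y for x, y in zip(arr, arr[1:]) if x > y]
--     a = descents[-1] if descents else 0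
--     # rebuild the list skipping the first occurrence of a (no in-place mutation)
--     out, removed = [], False
--     for x in arr:
--         if not removed and x == a:
--             removed = True
--         else:
--             out.append(x)
--     return out
-- ===== Notes on version B (the rewrite author's own statement) =====
-- stated objective: alternative
-- what changed: B replaces A's index-based overwrite loop and in-place arr.remove with a value pipeline: a zip/comprehension collects all descent values, the candidate is the last of that list (0 if empty), and the result is rebuilt in one pass with a removed flag instead of mutating arr; Pre_ excludes multi-element non-decreasing lists not containing 0, on which A raises ValueError while B returns the list unchanged.
import Mathlib
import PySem

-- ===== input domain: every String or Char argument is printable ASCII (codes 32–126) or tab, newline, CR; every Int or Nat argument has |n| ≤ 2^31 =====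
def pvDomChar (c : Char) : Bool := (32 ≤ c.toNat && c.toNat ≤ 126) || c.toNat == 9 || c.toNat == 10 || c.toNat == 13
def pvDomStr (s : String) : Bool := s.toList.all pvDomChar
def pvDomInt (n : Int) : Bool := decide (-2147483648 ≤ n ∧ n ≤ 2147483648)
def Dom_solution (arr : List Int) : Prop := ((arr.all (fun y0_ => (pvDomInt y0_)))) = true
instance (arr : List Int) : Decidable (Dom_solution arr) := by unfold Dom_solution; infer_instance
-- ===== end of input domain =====

-- B replaces A's index loop + in-place arr.remove by a zip/filter value pipeline (last descent
-- value) and a flagged one-pass rebuild; equivalence is about the RETURN value only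
-- (A mutates its argument, B does not).

-- ===== PORT A =====
def solution (arr : List Int) : List Int :=
  let a : Int := 0
  if 1 < arr.length then
    let a := (PySem.List.pyRange 1 arr.length 1).foldl
      (fun a i =>
        if PySem.List.pyGetD arr i 0 < PySem.List.pyGetD arr (i - 1) 0 then PySem.List.pyGetD arr i 0
        else a) a
    (PySem.List.remove? arr a).getD arr   -- none = ValueError, excluded by Pre_
  else [-1]

-- ===== PORT B =====
def solution_alt (arr : List Int) : List Int :=
  if arr.length ≤ 1 then [-1]
  else
    -- descents = [y for x, y in zip(arr, arr[1:]) if x > y]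
    let descents := (arr.zip arr.tail).filterMap (fun p => if p.2 < p.1 then some p.2 else none)
    -- a = descents[-1] if descents else 0
    let a := descents.getLast?.getD 0
    -- one pass with a removed flag rebuilding the list
    let st := arr.foldl
      (fun (s : List Int × Bool) x =>
        if ¬ s.2 ∧ x = a then (s.1, true) else (s.1 ++ [x], s.2)) ([], false)
    st.1

-- ===== PRECONDITION & SPEC =====
-- Pre_ excludes exactly the inputs where the Python A raises ValueError (arr.remove(0) on a
-- multi-element non-decreasing list not containing 0).
def Pre_solution (arr : List Int) : Prop :=
  arr.length ≤ 1 ∨ ¬ List.IsChain (· ≤ ·) arr ∨ (0 : Int) ∈ arr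
instance (arr : List Int) : Decidable (Pre_solution arr) := by unfold Pre_solution; infer_instance

def pvWitness_solution : List Int := [3, 1, 2]

def Spec_solution (arr : List Int) (out : List Int) : Prop := out = solution_alt arr
instance (arr : List Int) (out : List Int) : Decidable (Spec_solution arr out) := by unfold Spec_solution; infer_instance

-- ===== CLAIM (what is proved, stated in full; the proofs are below) =====
def Claim_equal_solution : Prop := ∀ (arr : List Int), Dom_solution arr → Pre_solution arr → Spec_solution arr (solution arr)

-- ===== LEMMAS AND PROOFS =====

-- B's descent pipeline
def descentsOf (arr : List Int) : List Int :=
  (arr.zip arr.tail).filterMap (fun p => if p.2 < p.1 then some p.2 else none)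

-- generic: a last-overwrite fold equals getLast of the filtered/mapped list
lemma foldl_overwrite_eq_getLast (P : List (Int × Int)) (a0 : Int) :
    P.foldl (fun a p => if p.2 < p.1 then p.2 else a) a0 =
      (P.filterMap (fun p => if p.2 < p.1 then some p.2 else none)).getLast?.getD a0 := by
  induction P generalizing a0 with
  | nil => rfl
  | cons p P ih =>
    by_cases h : p.2 < p.1
    · simp only [List.foldl_cons, List.filterMap_cons, if_pos h, ih]
      cases hF : P.filterMap (fun p => if p.2 < p.1 then some p.2 else none) with
      | nil => simp
      | cons q Q =>
        rw [List.getLast?_cons_cons, List.getLast?_eq_some_getLast (by simp : q :: Q ≠ [])]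
        simp
    · simp [List.foldl_cons, if_neg h, ih]

-- the zip of arr with its tail, as a map over indices
lemma zip_tail_eq_map_range (arr : List Int) :
    arr.zip arr.tail =
      (List.range (arr.length - 1)).map (fun k => (arr.getD k 0, arr.getD (k + 1) 0)) := by
  apply List.ext_getElem
  · simp [List.length_zip, List.length_tail]
  · intro k h1 h2
    simp only [List.length_zip, List.length_tail] at h1
    have hk : k + 1 < arr.length := by omega
    simp [List.getElem_zip, List.getElem_tail, List.getD_eq_getElem?_getD,
      List.getElem?_eq_getElem (by omega : k < arr.length), List.getElem?_eq_getElem hk]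

-- A's fold over pyRange 1 n 1 equals the fold over zip pairs
lemma foldA_eq_foldZip (arr : List Int) :
    (PySem.List.pyRange 1 arr.length 1).foldl
      (fun a i =>
        if PySem.List.pyGetD arr i 0 < PySem.List.pyGetD arr (i - 1) 0 then PySem.List.pyGetD arr i 0
        else a) 0 =
    (arr.zip arr.tail).foldl (fun a p => if p.2 < p.1 then p.2 else a) 0 := by
  rw [PySem.List.pyRange_one, zip_tail_eq_map_range, List.foldl_map, List.foldl_map]
  have he : ((arr.length : Int) - 1).toNat = arr.length - 1 := by omega
  rw [he]
  apply PySem.List.foldl_congr_mem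
  intro a k hk
  rw [List.mem_range] at hk
  have h2 : (1 : Int) + k = ((k + 1 : Nat) : Int) := by push_cast; ring
  have h3 : ((k + 1 : Nat) : Int) - 1 = ((k : Nat) : Int) := by push_cast; ring
  simp only [h2, h3, PySem.List.pyGetD_natCast]

lemma getLast?_mem_of_ne_nil {α : Type} (l : List α) (d : α) (h : l ≠ []) :
    l.getLast?.getD d ∈ l := by
  rw [List.getLast?_eq_some_getLast h, Option.getD_some]
  exact List.getLast_mem h

-- the chosen value is in arr whenever descents is nonempty
lemma descents_subset (arr : List Int) (v : Int) (hv : v ∈ descentsOf arr) : v ∈ arr := by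
  unfold descentsOf at hv
  rw [List.mem_filterMap] at hv
  obtain ⟨p, hp, hpv⟩ := hv
  have h2 : p.2 ∈ arr.tail := (List.of_mem_zip hp).2
  have : v = p.2 := by by_cases h : p.2 < p.1 <;> simp [h] at hpv; omega
  subst this
  exact List.mem_of_mem_tail h2

-- descents empty ↔ arr non-decreasing
lemma descents_nil_iff (arr : List Int) :
    descentsOf arr = [] ↔ List.IsChain (· ≤ ·) arr := by
  unfold descentsOf
  rw [List.filterMap_eq_nil_iff, List.isChain_iff_getElem]
  constructor
  · intro h k hk
    have hmem : (arr[k], arr[k + 1]) ∈ arr.zip arr.tail := by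
      rw [List.mem_iff_getElem]
      refine ⟨k, by simp [List.length_zip, List.length_tail]; omega, ?_⟩
      simp [List.getElem_zip, List.getElem_tail]
    have := h _ hmem
    by_cases hlt : arr[k + 1] < arr[k]
    · simp [hlt] at this
    · omega
  · intro h p hp
    rw [List.mem_iff_getElem] at hp
    obtain ⟨k, hk, hpk⟩ := hp
    simp only [List.length_zip, List.length_tail] at hk
    have hk' : k + 1 < arr.length := by omega
    have : p = (arr[k], arr[k + 1]) := by
      rw [← hpk]; simp [List.getElem_zip, List.getElem_tail]
    subst this
    have := h k (by omega)
    simp only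
    rw [if_neg (by omega)]

-- B's flagged rebuild loop
lemma rebuild_removed (arr : List Int) (a : Int) (acc : List Int) :
    arr.foldl (fun (s : List Int × Bool) x =>
        if ¬ s.2 ∧ x = a then (s.1, true) else (s.1 ++ [x], s.2)) (acc, true) =
      (acc ++ arr, true) := by
  induction arr generalizing acc with
  | nil => simp
  | cons y ys ih =>
    rw [List.foldl_cons, if_neg (by simp), ih]
    simp

lemma rebuild_eq_erase (arr : List Int) (a : Int) (acc : List Int) :
    (arr.foldl (fun (s : List Int × Bool) x =>
        if ¬ s.2 ∧ x = a then (s.1, true) else (s.1 ++ [x], s.2)) (acc, false)).1 =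
      acc ++ arr.erase a := by
  induction arr generalizing acc with
  | nil => simp
  | cons y ys ih =>
    by_cases h : y = a
    · subst h
      rw [List.foldl_cons, if_pos (by simp), rebuild_removed, List.erase_cons_head]
    · rw [List.foldl_cons, if_neg (by simp [h]), ih, List.erase_cons_tail (by simp [h])]
      simp

-- ===== VERDICT (by name: the statements are the Claim_ definitions above) =====
theorem solution_spec : Claim_equal_solution := by
  intro arr _ hpre
  unfold Spec_solution solution solution_alt
  by_cases hlen : 1 < arr.length
  · rw [if_pos hlen, if_neg (by omega)]
    dsimp only
    rw [foldA_eq_foldZip, foldl_overwrite_eq_getLast, rebuild_eq_erase, List.nil_append]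
    have hd : (arr.zip arr.tail).filterMap (fun p => if p.2 < p.1 then some p.2 else none) = descentsOf arr := rfl
    rw [hd]
    set a := (descentsOf arr).getLast?.getD 0 with ha
    have hmem : a ∈ arr := by
      by_cases hnil : descentsOf arr = []
      · have h0 : a = 0 := by rw [ha, hnil]; rfl
        rw [h0]
        rcases hpre with h | h | h
        · omega
        · exact absurd ((descents_nil_iff arr).mp hnil) h
        · exact h
      · exact descents_subset arr a (getLast?_mem_of_ne_nil _ 0 hnil)
    rw [PySem.List.remove?_eq_some_erase arr a hmem]
    rfl
  · rw [if_neg hlen, if_pos (by omega)]
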